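-- pv_equiv track=rewrite | github.com/SajithSUA/A-Content-based-and-Network-based-Approach-to-Rank-Users-in-Online-Health-Communities | AlldatasetsocialnetworkCreate.py | actualNumberOfPost
-- ===== SOURCE A (Python) =====
-- def actualNumberOfPost(name,nameList):
--     nameAndNumberOfPost= dict()
--     for oneName in nameList:
--         count=0
--         for x in name:
--             if oneName in x:
--                 count=count+1
--         nameAndNumberOfPost[oneName]=count
--     return nameAndNumberOfPost
-- ===== SOURCE B (Python) =====
-- def actualNumberOfPost(name, nameList):
--     # substring index: for each element, enumerate once its substrings whose
--     # lengths occur among the patterns, count elements per substring in a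
--     # dictionary, then answer every pattern by a single lookup
--     lens = {len(p) for p in nameList}
--     index = {}
--     for x in name:
--         n = len(x)
--         subs = {x[i:i + L] for L in lens for i in range(n - L + 1)}
--         for s in subs:
--             index[s] = index.get(s, 0) + 1
--     return {p: index.get(p, 0) for p in nameList}
-- ===== Notes on version B (the rewrite author's own statement) =====
-- stated objective: faster
-- what changed: B replaces A's nested membership-count (scan all elements once per pattern) by a substring index: it collects the pattern lengths, enumerates each element's substrings of those lengths once into a per-element set, accumulates a dictionary counting elements per substring, and answers every pattern by one dictionary lookup.
import Mathlib
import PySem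

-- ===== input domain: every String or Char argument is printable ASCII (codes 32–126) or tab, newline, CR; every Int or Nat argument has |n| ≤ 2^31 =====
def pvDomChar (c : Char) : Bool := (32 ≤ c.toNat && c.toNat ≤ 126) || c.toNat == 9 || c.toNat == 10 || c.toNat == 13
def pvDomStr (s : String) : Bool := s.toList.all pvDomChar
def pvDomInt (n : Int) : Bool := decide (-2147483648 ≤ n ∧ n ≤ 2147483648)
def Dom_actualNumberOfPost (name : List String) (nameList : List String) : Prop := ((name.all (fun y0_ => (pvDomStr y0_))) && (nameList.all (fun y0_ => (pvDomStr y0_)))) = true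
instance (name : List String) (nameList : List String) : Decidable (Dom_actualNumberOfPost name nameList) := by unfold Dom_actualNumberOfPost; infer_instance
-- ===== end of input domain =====

-- B builds a substring index (elements-per-substring counter over the substrings of
-- the pattern lengths) and answers each pattern by one lookup (objective: faster, measured).

-- ===== PORT A =====
def actualNumberOfPost (name : List String) (nameList : List String) : List (String × Int) :=
  (nameList.foldl (fun d oneName =>
      d.insert oneName (name.foldl (fun count x =>
        if PySem.Str.isIn oneName x then count + 1 else count) 0))
    PySem.Dict.empty).items

-- ===== PORT B =====
-- the list under Source B's per-element set comprehension {x[i:i+L] for L in lens for i in range(n-L+1)}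
def pvSubsList (lens : List Int) (x : String) : List String :=
  lens.flatMap (fun L =>
    (PySem.List.pyRange 0 (PySem.Str.len x - L + 1)).map
      (fun i => PySem.Str.slice x (some i) (some (i + L))))

def actualNumberOfPost_alt (name : List String) (nameList : List String) : List (String × Int) :=
  let lens : PySem.Set Int := PySem.Set.ofList (nameList.map PySem.Str.len)
  let index : PySem.Dict String Int := name.foldl (fun d x =>
    let subs : PySem.Set String := PySem.Set.ofList (pvSubsList lens x)
    subs.foldl (fun d s => d.insert s (d.getD s 0 + 1)) d) PySem.Dict.empty
  (nameList.foldl (fun d p => d.insert p (index.getD p 0)) PySem.Dict.empty).items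

-- ===== PRECONDITION & SPEC =====
def Spec_actualNumberOfPost (name : List String) (nameList : List String) (out : List (String × Int)) : Prop := out = actualNumberOfPost_alt name nameList
instance (name : List String) (nameList : List String) (out : List (String × Int)) : Decidable (Spec_actualNumberOfPost name nameList out) := by unfold Spec_actualNumberOfPost; infer_instance

-- ===== CLAIM (what is proved, stated in full; the proofs are below) =====
def Claim_equal_actualNumberOfPost : Prop := ∀ (name : List String) (nameList : List String), Dom_actualNumberOfPost name nameList → Spec_actualNumberOfPost name nameList (actualNumberOfPost name nameList)

-- ===== LEMMAS AND PROOFS =====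

-- membership in the per-element substring list: exactly the substrings of x whose length is in lens
lemma mem_pvSubsList (lens : List Int) (hpos : ∀ L ∈ lens, 0 ≤ L) (x k : String) :
    k ∈ pvSubsList lens x ↔
      ((k.toList.length : Int) ∈ lens ∧ PySem.Str.isIn k x = true) := by
  unfold pvSubsList
  simp only [List.mem_flatMap, List.mem_map]
  constructor
  · rintro ⟨L, hL, i, hi, rfl⟩
    have h0L := hpos L hL
    obtain ⟨h0i, hilt⟩ := PySem.List.mem_pyRange_one.mp hi
    rw [PySem.Str.len_eq] at hilt
    have hslice : (PySem.Str.slice x (some i) (some (i + L))).toList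
        = (x.toList.drop i.toNat).take ((i + L).toNat - i.toNat) := by
      simp only [PySem.Str.slice, PySem.Chars.slice]
      rw [PySem.List.slice_toNat _ h0i (by omega)]
      simp
    have hlenL : ((PySem.Str.slice x (some i) (some (i + L))).toList.length : Int) = L := by
      rw [hslice, List.length_take, List.length_drop]
      omega
    refine ⟨by rw [hlenL]; exact hL, ?_⟩
    rw [PySem.Str.isIn_iff_infix, hslice]
    exact (List.take_prefix _ _).isInfix.trans (List.drop_suffix _ _).isInfix
  · rintro ⟨hlen, hin⟩
    obtain ⟨s, t, hst⟩ := (PySem.Str.isIn_iff_infix k x).mp hin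
    have hkl : k.toList.length = k.length := String.length_toList
    have hle : s.length + k.toList.length ≤ x.toList.length := by
      rw [← hst]
      simp [List.length_append]
    refine ⟨(k.toList.length : Int), hlen, (s.length : Int), ?_, ?_⟩
    · rw [PySem.List.mem_pyRange_one, PySem.Str.len_eq]
      omega
    · apply String.toList_inj.mp
      simp only [PySem.Str.slice, PySem.Chars.slice]
      rw [PySem.List.slice_toNat _ (by positivity) (by positivity)]
      have h3 : ((s.length : Int) + (k.toList.length : Int)).toNat = s.length + k.toList.length := by
        omega
      have h4 : ((s.length : Int)).toNat = s.length := by omega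
      rw [h3, h4, ← hst, List.append_assoc, List.drop_left]
      have h5 : s.length + k.toList.length - s.length = k.toList.length := by omega
      rw [h5]
      simp

-- one element's increments: getD after the inner fold
lemma getD_incr (l : List String) (hnd : l.Nodup) (d : PySem.Dict String Int) (k : String) :
    (l.foldl (fun d s => d.insert s (d.getD s 0 + 1)) d).getD k 0 =
      d.getD k 0 + (if k ∈ l then 1 else 0) := by
  induction l generalizing d with
  | nil => simp
  | cons s t ih =>
    obtain ⟨hst, hndt⟩ := List.nodup_cons.mp hnd
    rw [List.foldl_cons, ih hndt, PySem.Dict.getD_insert]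
    by_cases hk : k = s
    · subst hk
      simp [hst]
    · by_cases ht : k ∈ t <;> simp [hk, ht]

-- the whole index: getD is the number of elements whose substring set contains k
lemma getD_index (lens : List Int) (name : List String) (d : PySem.Dict String Int) (k : String) :
    (name.foldl (fun d x =>
        (PySem.Set.ofList (pvSubsList lens x)).foldl
          (fun d s => d.insert s (d.getD s 0 + 1)) d) d).getD k 0 =
      d.getD k 0 + (name.countP (fun x => decide (k ∈ pvSubsList lens x)) : Int) := by
  induction name generalizing d with
  | nil => simp
  | cons x t ih =>
    rw [List.foldl_cons, ih,
      getD_incr _ (PySem.Set.nodup_ofList _) d k, List.countP_cons]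
    by_cases hm : k ∈ pvSubsList lens x
    · rw [if_pos ((PySem.Set.mem_ofList _ _).mpr hm)]
      simp only [hm, decide_true]
      push_cast
      ring
    · rw [if_neg (fun h => hm ((PySem.Set.mem_ofList _ _).mp h))]
      simp only [hm, decide_false]
      push_cast
      ring

-- ===== VERDICT (by name: the statement is the Claim_ definition above) =====
theorem actualNumberOfPost_spec : Claim_equal_actualNumberOfPost := by
  intro name nameList _
  unfold Spec_actualNumberOfPost actualNumberOfPost actualNumberOfPost_alt
  have hpos : ∀ L ∈ (PySem.Set.ofList (nameList.map PySem.Str.len) : List Int), 0 ≤ L := by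
    intro L hL
    obtain ⟨p, _, hp⟩ := List.mem_map.mp ((PySem.Set.mem_ofList _ _).mp hL)
    rw [← hp, PySem.Str.len_eq]
    positivity
  refine congrArg PySem.Dict.items
    (PySem.List.foldl_congr_mem nameList _ _ PySem.Dict.empty ?_)
  intro d k hk
  congr 1
  rw [PySem.List.foldl_if_add_one, getD_index, PySem.Dict.getD_empty, zero_add, zero_add]
  congr 1
  refine List.countP_congr (fun x _ => ?_)
  simp only [decide_eq_true_eq]
  rw [mem_pvSubsList _ hpos]
  have hlen : ((k.toList.length : Int)) ∈ (PySem.Set.ofList (nameList.map PySem.Str.len) : List Int) := by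
    rw [PySem.Set.mem_ofList]
    exact List.mem_map.mpr ⟨k, hk, (PySem.Str.len_eq k)⟩
  constructor
  · exact fun h => ⟨hlen, h⟩
  · exact fun h => h.2
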